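-- pv_equiv track=rewrite | github.com/Spencerfar/Pore-SFD | PlottingCode/two_state_vs_Ron.py | calc_timings
-- ===== SOURCE A (Python) =====
-- def calc_timings(data):
--
--     index_high = []
--     index_low = []
--
--     temp_index_high = []
--     temp_index_low = []
--
--     bound = False
--
--     for i, (time, step, out, number_bound, _)  in enumerate(data):
--
--         if number_bound == 0:
--             temp_index_high.append(i)
--             if not bound and i != 0:
--                 temp_index_low.append(i)
--                 index_low.append(temp_index_low)
--                 temp_index_low = []
--             bound=True
--
--
--         else:
--             temp_index_low.append(i)
--             if bound:
--                 temp_index_high.append(i)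
--                 index_high.append(temp_index_high)
--                 temp_index_high = []
--             bound=False
--
--     if bound:
--         temp_index_high.append(i)
--         index_high.append(temp_index_high)
--         temp_index_high = []
--     else:
--         temp_index_low.append(i)
--         index_low.append(temp_index_low)
--         temp_index_low = []
--     return index_high, index_low
-- ===== SOURCE B (Python) =====
-- def calc_timings(data):
--     # Two-pass: first compute the run structure (consecutive indices grouped by
--     # the state number_bound == 0), then assemble the output segments: every run
--     # except the last gets the first index of the next run appended; the last
--     # run gets its own last index duplicated.
--     runs = []  # list of (state, [indices]) in order
--     for i, row in enumerate(data):
--         state = row[3] == 0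
--         if runs and runs[-1][0] == state:
--             runs[-1][1].append(i)
--         else:
--             runs.append((state, [i]))
--     index_high = []
--     index_low = []
--     for k, (state, idxs) in enumerate(runs):
--         if k + 1 < len(runs):
--             seg = idxs + [runs[k + 1][1][0]]
--         else:
--             seg = idxs + [idxs[-1]]
--         (index_high if state else index_low).append(seg)
--     return index_high, index_low
-- ===== Notes on version B (the rewrite author's own statement) =====
-- stated objective: alternative
-- what changed: Replaces A's one-pass state machine with flushed temp buffers by a two-pass decomposition: first group consecutive indices into (state, indices) runs, then assemble each run with the next run's first index (or its own last index duplicated for the final run).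
import Mathlib
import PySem

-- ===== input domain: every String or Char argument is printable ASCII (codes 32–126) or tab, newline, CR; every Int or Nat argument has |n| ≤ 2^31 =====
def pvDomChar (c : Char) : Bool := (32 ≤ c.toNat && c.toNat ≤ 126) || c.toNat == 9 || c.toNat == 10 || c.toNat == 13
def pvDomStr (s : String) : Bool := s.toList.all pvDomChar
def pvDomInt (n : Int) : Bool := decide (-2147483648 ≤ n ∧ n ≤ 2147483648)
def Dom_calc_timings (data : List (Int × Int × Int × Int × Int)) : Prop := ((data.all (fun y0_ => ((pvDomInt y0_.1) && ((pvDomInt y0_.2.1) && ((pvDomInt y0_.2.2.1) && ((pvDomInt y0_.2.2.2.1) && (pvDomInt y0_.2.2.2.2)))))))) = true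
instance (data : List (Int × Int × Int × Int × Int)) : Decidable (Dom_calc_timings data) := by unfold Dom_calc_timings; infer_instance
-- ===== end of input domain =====

-- B replaces A's one-pass temp-buffer state machine by a two-pass run decomposition
-- (group consecutive indices by state, then assemble segments with overlap).


-- ===== PORT A =====
-- loop state: (index_high, index_low, temp_index_high, temp_index_low, bound); i threads the enumerate index
def calcLoopA (i : Int) (rest : List (Int × Int × Int × Int × Int))
    (st : List (List Int) × List (List Int) × List Int × List Int × Bool) :
    List (List Int) × List (List Int) × List Int × List Int × Bool :=
  match rest, st with
  | [], st => st
  | r :: rest, (ih, il, th, tl, bound) =>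
    if r.2.2.2.1 == 0 then
      let th := th ++ [i]
      if !bound && i != 0 then
        calcLoopA (i + 1) rest (ih, il ++ [tl ++ [i]], th, [], true)
      else
        calcLoopA (i + 1) rest (ih, il, th, tl, true)
    else
      let tl := tl ++ [i]
      if bound then
        calcLoopA (i + 1) rest (ih ++ [th ++ [i]], il, [], tl, false)
      else
        calcLoopA (i + 1) rest (ih, il, th, tl, false)

-- the post-loop flush; iLast is the last value of the loop variable i
def calcFinA (iLast : Int) (st : List (List Int) × List (List Int) × List Int × List Int × Bool) :
    List (List Int) × List (List Int) :=
  match st with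
  | (ih, il, th, tl, bound) =>
    if bound then (ih ++ [th ++ [iLast]], il) else (ih, il ++ [tl ++ [iLast]])

def calc_timings (data : List (Int × Int × Int × Int × Int)) : List (List Int) × List (List Int) :=
  calcFinA ((data.length : Int) - 1) (calcLoopA 0 data ([], [], [], [], false))

-- ===== PORT B =====
-- `if runs and runs[-1][0] == state: runs[-1][1].append(i) else: runs.append((state,[i]))`
def addIdx (runs : List (Bool × List Int)) (state : Bool) (i : Int) : List (Bool × List Int) :=
  match runs with
  | [] => [(state, [i])]
  | [(s0, idxs)] => if s0 == state then [(s0, idxs ++ [i])] else [(s0, idxs), (state, [i])]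
  | r :: rs => r :: addIdx rs state i

-- pass 1 of Source B: fold the grouping over the data, threading the enumerate index
def runsFrom (i : Int) (rest : List (Int × Int × Int × Int × Int)) (runs : List (Bool × List Int)) :
    List (Bool × List Int) :=
  match rest with
  | [] => runs
  | r :: rest => runsFrom (i + 1) rest (addIdx runs (r.2.2.2.1 == 0) i)

-- pass 2 of Source B; runs[k+1][1][0] / idxs[-1] on provably nonempty lists ported as headD / getLastD
def assembleRuns (runs : List (Bool × List Int)) : List (List Int) × List (List Int) :=
  match runs with
  | [] => ([], [])
  | (s, idxs) :: rest =>
    let seg := match rest with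
      | (_, nidxs) :: _ => idxs ++ [nidxs.headD 0]
      | [] => idxs ++ [idxs.getLastD 0]
    let p := assembleRuns rest
    if s then (seg :: p.1, p.2) else (p.1, seg :: p.2)

def calc_timings_alt (data : List (Int × Int × Int × Int × Int)) : List (List Int) × List (List Int) :=
  assembleRuns (runsFrom 0 data [])

-- ===== PRECONDITION & SPEC =====
-- A raises NameError on empty data (it reads the loop variable i after a loop over nothing), so Pre_ excludes only the empty list.
def Pre_calc_timings (data : List (Int × Int × Int × Int × Int)) : Prop := data ≠ []
instance (data : List (Int × Int × Int × Int × Int)) : Decidable (Pre_calc_timings data) := by unfold Pre_calc_timings; infer_instance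
def pvWitness_calc_timings : (List (Int × Int × Int × Int × Int)) := [(0, 0, 0, 0, 0), (1, 1, 1, 1, 1)]

def Spec_calc_timings (data : List (Int × Int × Int × Int × Int)) (out : List (List Int) × List (List Int)) : Prop := out = calc_timings_alt data
instance (data : List (Int × Int × Int × Int × Int)) (out : List (List Int) × List (List Int)) : Decidable (Spec_calc_timings data out) := by unfold Spec_calc_timings; infer_instance

-- ===== CLAIM (what is proved, stated in full; the proofs are below) =====
def Claim_equal_calc_timings : Prop := ∀ (data : List (Int × Int × Int × Int × Int)), Dom_calc_timings data → Pre_calc_timings data → Spec_calc_timings data (calc_timings data)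

-- ===== LEMMAS AND PROOFS =====

-- addIdx never empties a run list and, on a cons with nonempty tail, only touches the tail
theorem addIdx_ne_nil (runs : List (Bool × List Int)) (s : Bool) (i : Int) :
    addIdx runs s i ≠ [] := by
  match runs with
  | [] => simp [addIdx]
  | [(s0, idxs)] => simp [addIdx]; split <;> simp
  | r :: r2 :: rs => simp [addIdx]

theorem addIdx_cons (r : Bool × List Int) (rs : List (Bool × List Int)) (hrs : rs ≠ []) (s : Bool) (i : Int) :
    addIdx (r :: rs) s i = r :: addIdx rs s i := by
  match rs with
  | [] => exact absurd rfl hrs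
  | r2 :: rs' =>
    match r with
    | (s0, idxs) => rfl

-- runsFrom on a cons with nonempty tail keeps the head run untouched
theorem runsFrom_cons (rest : List (Int × Int × Int × Int × Int)) (i : Int)
    (r : Bool × List Int) (rs : List (Bool × List Int)) (hrs : rs ≠ []) :
    runsFrom i rest (r :: rs) = r :: runsFrom i rest rs := by
  induction rest generalizing i rs with
  | nil => simp [runsFrom]
  | cons x rest ih =>
    simp only [runsFrom]
    rw [addIdx_cons r rs hrs, ih _ _ (addIdx_ne_nil _ _ _)]

-- the head run of runsFrom on a singleton keeps its state and its first index
theorem runsFrom_head (rest : List (Int × Int × Int × Int × Int)) (i : Int)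
    (s : Bool) (c : List Int) (hc : c ≠ []) :
    ∃ c' tail, runsFrom i rest [(s, c)] = (s, c') :: tail ∧ c'.headD 0 = c.headD 0 := by
  induction rest generalizing i c with
  | nil => exact ⟨c, [], rfl, rfl⟩
  | cons r rest ih =>
    simp only [runsFrom, addIdx]
    by_cases hs : s = (r.2.2.2.1 == 0)
    · simp only [← hs, beq_self_eq_true, if_true]
      obtain ⟨c', tail, heq, hhd⟩ := ih (i + 1) (c ++ [i]) (by simp)
      refine ⟨c', tail, heq, ?_⟩
      rw [hhd]
      match c with
      | a :: c0 => rfl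
    · have : (s == (r.2.2.2.1 == 0)) = false := by simp [hs]
      rw [this]
      simp only [if_false, Bool.false_eq_true]
      rw [runsFrom_cons _ _ _ _ (by simp)]
      exact ⟨c, _, rfl, rfl⟩

-- main invariant: mid-loop, A's active temp buffer holds exactly the current run
theorem loop_invariant (rest : List (Int × Int × Int × Int × Int)) (i : Int)
    (ih il : List (List Int)) (s : Bool) (cur : List Int)
    (hcur : cur ≠ []) (hlast : cur.getLast?.getD 0 = i - 1) (hi : 1 ≤ i) :
    calcFinA ((i + rest.length) - 1)
      (calcLoopA i rest (ih, il, (if s then cur else []), (if s then [] else cur), s))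
    = (ih ++ (assembleRuns (runsFrom i rest [(s, cur)])).1,
       il ++ (assembleRuns (runsFrom i rest [(s, cur)])).2) := by
  induction rest generalizing i ih il s cur with
  | nil =>
    simp only [calcLoopA, runsFrom, List.length_nil, Int.natCast_zero, Int.add_zero]
    cases s <;>
      simp [calcFinA, assembleRuns, List.getLastD_eq_getLast?, hlast]
  | cons r rest ihyp =>
    have hlen : (i + (↑(r :: rest).length)) - 1 = ((i + 1) + (↑rest.length)) - 1 := by
      simp only [List.length_cons]; push_cast; ring
    rw [hlen]
    simp only [calcLoopA, runsFrom, addIdx]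
    by_cases hs : (r.2.2.2.1 == 0) = true
    · -- current element is high
      rw [if_pos hs]
      cases s with
      | true =>
        -- high run continues
        simp only [hs, beq_self_eq_true, if_true, Bool.not_true, Bool.false_and,
          Bool.false_eq_true, if_false, beq_self_eq_true]
        have := ihyp (i + 1) ih il true (cur ++ [i]) (by simp)
          (by simp) (by omega)
        simpa using this
      | false =>
        -- low → high transition at i
        have hine : (i != 0) = true := by
          simp only [bne_iff_ne, ne_eq]; omega
        try simp only [Bool.false_eq_true, if_false, List.nil_append]
        try simp only [hs, Bool.not_false, Bool.true_and, hine, if_true]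
        rw [if_neg (by decide : ¬ ((false : Bool) == true) = true)]
        rw [runsFrom_cons _ _ _ _ (by simp)]
        obtain ⟨c', tail, heq, hhd⟩ := runsFrom_head rest (i + 1) true [i] (by simp)
        rw [heq]
        have step := ihyp (i + 1) ih (il ++ [cur ++ [i]]) true [i] (by simp)
          (by simp) (by omega)
        simp only [heq, if_true] at step
        rw [step]
        have hhd' : c'.head?.getD 0 = i := by simpa [List.headD_eq_head?] using hhd
        simp [assembleRuns, hhd']
    · -- current element is low
      have hs' : (r.2.2.2.1 == 0) = false := by simpa using hs
      rw [hs']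
      simp only [Bool.false_eq_true, if_false]
      cases s with
      | true =>
        -- high → low transition at i
        try simp only [if_true]
        try simp only [List.nil_append]
        rw [if_neg (by decide : ¬ ((true : Bool) == false) = true)]
        rw [runsFrom_cons _ _ _ _ (by simp)]
        obtain ⟨c', tail, heq, hhd⟩ := runsFrom_head rest (i + 1) false [i] (by simp)
        rw [heq]
        have step := ihyp (i + 1) (ih ++ [cur ++ [i]]) il false [i] (by simp)
          (by simp) (by omega)
        simp only [heq, Bool.false_eq_true, if_false] at step
        rw [step]
        have hhd' : c'.head?.getD 0 = i := by simpa [List.headD_eq_head?] using hhd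
        simp [assembleRuns, hhd']
      | false =>
        -- low run continues
        try simp only [beq_self_eq_true, if_true, Bool.false_eq_true, if_false]
        try simp only [List.nil_append]
        have := ihyp (i + 1) ih il false (cur ++ [i]) (by simp)
          (by simp) (by omega)
        simpa using this
-- ===== VERDICT (by name: the statement is the Claim_ definition above) =====
theorem calc_timings_spec : Claim_equal_calc_timings := by
  intro data _ hpre
  unfold Spec_calc_timings calc_timings calc_timings_alt
  match data with
  | [] => exact absurd rfl hpre
  | r :: rest =>
    have hlen : ((↑(r :: rest).length : Int)) - 1 = (1 + (↑rest.length)) - 1 := by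
      simp only [List.length_cons]; push_cast; ring
    rw [hlen]
    simp only [calcLoopA, runsFrom, addIdx]
    by_cases hs : (r.2.2.2.1 == 0) = true
    · rw [if_pos hs]
      simp only [show ((0 : Int) != 0) = false from rfl, Bool.and_false, Bool.false_eq_true,
        if_false, List.nil_append]
      have := loop_invariant rest 1 [] [] true [0] (by simp) (by simp) (by omega)
      simp only [if_true, List.nil_append] at this
      rw [show (0 : Int) + 1 = 1 from rfl, hs]
      exact this.trans rfl
    · have hs' : (r.2.2.2.1 == 0) = false := by simpa using hs
      rw [hs']
      simp only [Bool.false_eq_true, if_false, List.nil_append]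
      have := loop_invariant rest 1 [] [] false [0] (by simp) (by simp) (by omega)
      simp only [Bool.false_eq_true, if_false, List.nil_append] at this
      exact this.trans rfl
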